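-- pv_equiv track=rewrite | github.com/azrsh/emoji-count-bot | dic2text.py | convert_to_ranking
-- ===== SOURCE A (Python) =====
-- def ordinal_number(i):
--     return {1:"1 st", 2:"2 nd", 3:"3 rd"}.get(i) or str(i) + " th"
--
-- def convert_to_ranking(dic, width=5):
--     lines = [' Rank | Emoji | Uses ']
--     line = ''
--     index = 0
--     rank = 1
--     previousValue = next(iter(dic.values()))
--     for key, value in dic.items():
--         if value != previousValue:
--             rank += 1
--         if index < 5:
--             line += ordinal_number(rank) + '\t'
--         line += str(key) + '\t' + str(value).rjust(4) + '\t'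
--         if index < 5 or index % width == 4:
--             lines.append(line)
--             line = ''
--         index += 1
--         previousValue = value
--     return lines
-- ===== SOURCE B (Python) =====
-- def ordinal_number(i):
--     return {1:"1 st", 2:"2 nd", 3:"3 rd"}.get(i) or str(i) + " th"
--
-- def convert_to_ranking(dic, width=5):
--     items = list(dic.items())
--     top = items[:5]
--     # ranks for the first five entries: bump the rank whenever the value changes
--     ranks = []
--     rank = 1
--     prev = items[0][1]
--     for _, v in top:
--         if v != prev:
--             rank += 1
--         ranks.append(rank)
--         prev = v
--     lines = [' Rank | Emoji | Uses ']
--     for (k, v), r in zip(top, ranks):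
--         lines.append(ordinal_number(r) + '\t' + str(k) + '\t' + str(v).rjust(4) + '\t')
--     buf = ''
--     for i in range(5, len(items)):
--         k, v = items[i]
--         buf += str(k) + '\t' + str(v).rjust(4) + '\t'
--         if i % width == 4:
--             lines.append(buf)
--             buf = ''
--     return lines
-- ===== Notes on version B (the rewrite author's own statement) =====
-- stated objective: simpler
-- what changed: A's single loop threading five pieces of mutable state (lines, pending line, index, rank, previousValue) is decomposed into phases: a ranks pass over the first five entries, a direct zip emitting the five ordinal-prefixed rows, and a separate chunk-accumulating loop for the remaining entries.
import Mathlib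
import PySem

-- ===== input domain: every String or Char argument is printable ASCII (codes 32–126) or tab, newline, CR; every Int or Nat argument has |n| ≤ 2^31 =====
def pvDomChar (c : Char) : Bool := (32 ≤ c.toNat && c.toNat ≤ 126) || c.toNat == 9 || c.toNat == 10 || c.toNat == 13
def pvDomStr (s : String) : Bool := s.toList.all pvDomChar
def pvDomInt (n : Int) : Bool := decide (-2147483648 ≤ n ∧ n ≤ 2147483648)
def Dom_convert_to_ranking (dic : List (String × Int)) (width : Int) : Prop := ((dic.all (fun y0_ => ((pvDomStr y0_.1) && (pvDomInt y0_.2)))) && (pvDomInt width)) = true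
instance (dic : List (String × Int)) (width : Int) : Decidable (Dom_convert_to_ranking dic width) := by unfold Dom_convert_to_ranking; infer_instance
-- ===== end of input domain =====

-- B replaces A's single five-state loop by a two-phase decomposition (a ranks pass for
-- the first five rows, then a chunk-accumulating pass for the rest); objective: simpler.

-- ===== PORT A =====
-- {1:"1 st", 2:"2 nd", 3:"3 rd"}.get(i) or str(i) + " th"  (the dict's values are
-- non-empty strings, so the `or` fallback fires exactly when .get returns None)
def ordinal_number (i : Int) : String :=
  match (PySem.Dict.ofList [((1 : Int), "1 st"), (2, "2 nd"), (3, "3 rd")]).get? i with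
  | some s => s
  | none => PySem.Int.toStr i ++ " th"

-- s.rjust(4): hand port (PySem has no rjust); exact — left-pad with spaces to width w
def pyRjust (s : String) (w : Nat) : String :=
  String.ofList (List.replicate (w - s.toList.length) ' ' ++ s.toList)

-- A's for-loop, as structural recursion over the same five-component state
def convert_loop (width : Int) (items : List (String × Int)) (lines : List String)
    (line : String) (index rank prev : Int) : List String :=
  match items with
  | [] => lines
  | (key, value) :: rest =>
    let rank := if value ≠ prev then rank + 1 else rank
    let line := if index < 5 then line ++ ordinal_number rank ++ "\t" else line
    let line := line ++ key ++ "\t" ++ pyRjust (PySem.Int.toStr value) 4 ++ "\t"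
    if index < 5 ∨ PySem.Int.mod index width = 4 then
      convert_loop width rest (lines ++ [line]) "" (index + 1) rank value
    else
      convert_loop width rest lines line (index + 1) rank value

-- previousValue = next(iter(dic.values())): head's value (Pre_ excludes the empty dict)
def convert_to_ranking (dic : List (String × Int)) (width : Int) : List String :=
  convert_loop width dic [" Rank | Emoji | Uses "] "" 0 1 (dic.headD ("", 0)).2

-- ===== PORT B =====
-- the ranks pass of Source B (over the first five entries)
def ranks_of (vals : List Int) (prev rank : Int) : List Int :=
  match vals with
  | [] => []
  | v :: rest =>
    let rank := if v ≠ prev then rank + 1 else rank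
    rank :: ranks_of rest v rank

-- Source B's `for i in range(5, len(items))` chunk loop, i carried explicitly
def chunk_loop (width : Int) (items : List (String × Int)) (i : Int)
    (buf : String) (lines : List String) : List String :=
  match items with
  | [] => lines
  | (k, v) :: rest =>
    let buf := buf ++ k ++ "\t" ++ pyRjust (PySem.Int.toStr v) 4 ++ "\t"
    if PySem.Int.mod i width = 4 then chunk_loop width rest (i + 1) "" (lines ++ [buf])
    else chunk_loop width rest (i + 1) buf lines

def convert_to_ranking_alt (dic : List (String × Int)) (width : Int) : List String :=
  let top := dic.take 5
  let ranks := ranks_of (top.map Prod.snd) (dic.headD ("", 0)).2 1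
  let lines := " Rank | Emoji | Uses " ::
    List.zipWith (fun (kv : String × Int) (r : Int) =>
      ordinal_number r ++ "\t" ++ kv.1 ++ "\t" ++ pyRjust (PySem.Int.toStr kv.2) 4 ++ "\t")
      top ranks
  chunk_loop width (dic.drop 5) 5 "" lines

-- ===== PRECONDITION & SPEC =====
-- Pre_ excludes exactly the inputs where A raises: the empty dict (next(iter(...)) raises
-- StopIteration) and width = 0 with more than five entries (index % width raises
-- ZeroDivisionError once index reaches 5).
def Pre_convert_to_ranking (dic : List (String × Int)) (width : Int) : Prop :=
  dic ≠ [] ∧ (width ≠ 0 ∨ dic.length ≤ 5)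
instance (dic : List (String × Int)) (width : Int) : Decidable (Pre_convert_to_ranking dic width) := by unfold Pre_convert_to_ranking; infer_instance
def pvWitness_convert_to_ranking : (List (String × Int)) × Int := ([("a", 3), ("b", 1)], 5)

def Spec_convert_to_ranking (dic : List (String × Int)) (width : Int) (out : List String) : Prop := out = convert_to_ranking_alt dic width
instance (dic : List (String × Int)) (width : Int) (out : List String) : Decidable (Spec_convert_to_ranking dic width out) := by unfold Spec_convert_to_ranking; infer_instance

-- ===== CLAIM (what is proved, stated in full; the proofs are below) =====
def Claim_equal_convert_to_ranking : Prop := ∀ (dic : List (String × Int)) (width : Int), Dom_convert_to_ranking dic width → Pre_convert_to_ranking dic width → Spec_convert_to_ranking dic width (convert_to_ranking dic width)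

-- ===== LEMMAS AND PROOFS =====

theorem empty_append (s : String) : "" ++ s = s := by
  cases s; rfl

-- Phase 2: once index ≥ 5, A's loop is B's chunk loop (rank/prev no longer matter)
theorem loop_ge_five (width : Int) (items : List (String × Int)) :
    ∀ (lines : List String) (line : String) (i rank prev : Int), 5 ≤ i →
      convert_loop width items lines line i rank prev = chunk_loop width items i line lines := by
  induction items with
  | nil => intro lines line i rank prev _; rfl
  | cons hd tl ih =>
    intro lines line i rank prev hi
    obtain ⟨k, v⟩ := hd
    simp only [convert_loop, chunk_loop]
    have h5 : ¬ i < 5 := by omega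
    simp only [h5, if_false, false_or]
    split
    · exact ih _ _ _ _ _ (by omega)
    · exact ih _ _ _ _ _ (by omega)

-- Phase 1: while index stays below 5, each step appends one ordinal-prefixed line,
-- matching B's zipWith over ranks_of
theorem loop_lt_five (width : Int) (items : List (String × Int)) :
    ∀ (rest : List (String × Int)) (lines : List String) (i rank prev : Int),
      i + (items.length : Int) ≤ 5 →
      ∃ r' p', convert_loop width (items ++ rest) lines "" i rank prev =
        convert_loop width rest
          (lines ++ List.zipWith (fun (kv : String × Int) (r : Int) =>
              ordinal_number r ++ "\t" ++ kv.1 ++ "\t" ++ pyRjust (PySem.Int.toStr kv.2) 4 ++ "\t")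
            items (ranks_of (items.map Prod.snd) prev rank))
          "" (i + (items.length : Int)) r' p' := by
  induction items with
  | nil =>
    intro rest lines i rank prev _
    exact ⟨rank, prev, by simp⟩
  | cons hd tl ih =>
    intro rest lines i rank prev hle
    obtain ⟨k, v⟩ := hd
    have hi : i < 5 := by
      simp only [List.length_cons] at hle; push_cast at hle; omega
    simp only [List.cons_append, convert_loop, hi, true_or, if_pos, empty_append]
    have harith : (i + 1) + (tl.length : Int) = i + ((k, v) :: tl).length := by
      simp only [List.length_cons]; push_cast; ring
    obtain ⟨r', p', h⟩ := ih rest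
      (lines ++ [(ordinal_number (if v ≠ prev then rank + 1 else rank) ++ "\t") ++ k ++ "\t" ++ pyRjust (PySem.Int.toStr v) 4 ++ "\t"])
      (i + 1) (if v ≠ prev then rank + 1 else rank) v
      (by simp only [List.length_cons] at hle; push_cast at hle ⊢; omega)
    refine ⟨r', p', ?_⟩
    rw [h, harith]
    simp only [List.map_cons, ranks_of, List.zipWith_cons_cons, List.append_assoc,
      List.singleton_append, String.append_assoc]

-- ===== VERDICT (by name: the statement is the Claim_ definition above) =====
theorem convert_to_ranking_spec : Claim_equal_convert_to_ranking := by
  intro dic width _hdom hpre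
  unfold Spec_convert_to_ranking convert_to_ranking convert_to_ranking_alt
  have htlen : (dic.take 5).length = min 5 dic.length := List.length_take
  obtain ⟨r', p', h⟩ := loop_lt_five width (dic.take 5) (dic.drop 5)
    [" Rank | Emoji | Uses "] 0 1 (dic.headD ("", 0)).2
    (by rw [htlen]; push_cast; omega)
  rw [List.take_append_drop] at h
  rw [h]
  by_cases hlen : dic.length ≤ 5
  · have hd : dic.drop 5 = [] := List.drop_eq_nil_of_le hlen
    rw [hd]
    simp [convert_loop, chunk_loop, List.take_of_length_le hlen]
  · have h5 : (dic.take 5).length = 5 := by omega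
    have hc : ((0 : Int) + ((dic.take 5).length : Int)) = 5 := by rw [h5]; norm_num
    rw [hc, loop_ge_five width (dic.drop 5) _ "" 5 r' p' (by omega)]
    simp
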